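-- pv_equiv track=rewrite | github.com/akhandsingh17/assignments | leetcode/LeetCode1016.py | LeetCode1016
-- ===== SOURCE A (Python) =====
-- def GetBinary(num):
--
--     tmp=[]
--     while num!=0:
--         rem=num%2
--         tmp.append(str(rem))
--         num=num//2
--     tmp.reverse()
--     return ''.join(tmp)
--
-- def LeetCode1016(bin_string, n):
--
--     lst=[]
--     i=1
--     while i<=n:
--         lst.append(i)
--         i=i+1
--     bin_lst=[]
--     for num in lst:
--         bin_num=GetBinary(num)
--         bin_lst.append(bin_num)
--
--     for bin_num in bin_lst:
--         try:
--             idx=bin_string.index(bin_num)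
--         except:
--             return False
--     return True
-- ===== SOURCE B (Python) =====
-- def _bits(i):
--     if i == 0:
--         return ""
--     return _bits(i // 2) + ("1" if i % 2 else "0")
--
--
-- def LeetCode1016(bin_string, n):
--     # Only the top half (n//2, n] needs checking: for k <= n//2, bin(k) is a
--     # prefix of bin(2k) and 2k <= n, so bin(2k) being a substring implies bin(k) is.
--     for i in range(n // 2 + 1, n + 1):
--         if _bits(i) not in bin_string:
--             return False
--     return True
-- ===== Notes on version B (the rewrite author's own statement) =====
-- stated objective: faster
-- what changed: B checks only the top half (n//2, n] of the range (bin(k) is a prefix of bin(2k), so the lower half is implied) and tests each binary string as it is produced with an early return, whereas A first materializes the full list 1..n, then a full list of all n binary strings, and only then scans; B's binary helper is a direct recursive conversion instead of A's append-reverse-join loop.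
import Mathlib
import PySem

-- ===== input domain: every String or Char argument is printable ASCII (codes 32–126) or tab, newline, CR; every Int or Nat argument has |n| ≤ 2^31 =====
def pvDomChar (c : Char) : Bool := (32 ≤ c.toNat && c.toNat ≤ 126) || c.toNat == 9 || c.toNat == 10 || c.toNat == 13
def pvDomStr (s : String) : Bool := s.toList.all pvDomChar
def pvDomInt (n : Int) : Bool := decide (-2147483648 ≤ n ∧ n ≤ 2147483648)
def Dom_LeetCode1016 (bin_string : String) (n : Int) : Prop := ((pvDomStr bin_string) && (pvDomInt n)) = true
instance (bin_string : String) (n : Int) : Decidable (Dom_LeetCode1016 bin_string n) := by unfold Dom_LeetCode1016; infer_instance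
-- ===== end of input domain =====

-- B checks only the upper half (n//2, n] of the range (bin(k) is a prefix of bin(2k)); same return value, alternative algorithm.

-- ===== PORT A =====
-- GetBinary's while loop; Python diverges for num < 0 (never reached: A calls it only with num ≥ 1),
-- so the guard is `num ≤ 0` instead of `num = 0`.
def GetBinaryLoop (num : Int) (tmp : List String) : List String :=
  if num ≤ 0 then tmp
  else GetBinaryLoop (PySem.Int.floordiv num 2) (tmp ++ [PySem.Int.toStr (PySem.Int.mod num 2)])
termination_by num.toNat
decreasing_by
  rename_i h
  rw [PySem.Int.floordiv_eq_ediv_of_pos (by omega)]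
  omega

def GetBinary (num : Int) : String :=
  PySem.Str.join "" (GetBinaryLoop num []).reverse

-- while i <= n: lst.append(i)
def BuildLst (i n : Int) (lst : List Int) : List Int :=
  if n < i then lst
  else BuildLst (i + 1) n (lst ++ [i])
termination_by (n + 1 - i).toNat

-- for bin_num in bin_lst: try bin_string.index(bin_num) except: return False
def CheckLoop (bin_string : String) : List String → Bool
  | [] => true
  | b :: rest =>
      if PySem.Str.find bin_string b = -1 then false
      else CheckLoop bin_string rest

def LeetCode1016 (bin_string : String) (n : Int) : Bool :=
  CheckLoop bin_string
    ((BuildLst 1 n []).foldl (fun acc num => acc ++ [GetBinary num]) [])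

-- ===== PORT B =====
-- _bits; Python diverges for i < 0 (never reached: B calls it only with i ≥ 1), so the guard is `i ≤ 0`.
def AltBits (i : Int) : List Char :=
  if i ≤ 0 then []
  else AltBits (PySem.Int.floordiv i 2) ++ [if PySem.Int.mod i 2 = 1 then '1' else '0']
termination_by i.toNat
decreasing_by
  rename_i h
  rw [PySem.Int.floordiv_eq_ediv_of_pos (by omega)]
  omega

def LeetCode1016_alt (bin_string : String) (n : Int) : Bool :=
  (PySem.List.pyRange (PySem.Int.floordiv n 2 + 1) (n + 1) 1).all
    (fun i => PySem.Str.isIn (String.ofList (AltBits i)) bin_string)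

-- ===== PRECONDITION & SPEC =====
def Spec_LeetCode1016 (bin_string : String) (n : Int) (out : Bool) : Prop := out = LeetCode1016_alt bin_string n
instance (bin_string : String) (n : Int) (out : Bool) : Decidable (Spec_LeetCode1016 bin_string n out) := by unfold Spec_LeetCode1016; infer_instance

-- ===== CLAIM (what is proved, stated in full; the proofs are below) =====
def Claim_equal_LeetCode1016 : Prop := ∀ (bin_string : String) (n : Int), Dom_LeetCode1016 bin_string n → Spec_LeetCode1016 bin_string n (LeetCode1016 bin_string n)

-- ===== LEMMAS AND PROOFS =====

-- LSB-first digit list mirroring GetBinary's loop body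
def LsbChars (i : Int) : List Char :=
  if i ≤ 0 then []
  else (if PySem.Int.mod i 2 = 1 then '1' else '0') :: LsbChars (PySem.Int.floordiv i 2)
termination_by i.toNat
decreasing_by
  rename_i h
  rw [PySem.Int.floordiv_eq_ediv_of_pos (by omega)]
  omega

theorem getBinaryLoop_eq (num : Int) (tmp : List String) :
    GetBinaryLoop num tmp = tmp ++ (LsbChars num).map (fun c => String.ofList [c]) := by
  induction num, tmp using GetBinaryLoop.induct with
  | case1 num tmp h =>
      rw [GetBinaryLoop, LsbChars]
      simp [h]
  | case2 num tmp h ih =>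
      rw [GetBinaryLoop, LsbChars]
      simp only [h, if_false]
      rw [ih]
      have h0 : 0 ≤ PySem.Int.mod num 2 := PySem.Int.mod_nonneg _ (by omega)
      have h1 : PySem.Int.mod num 2 < 2 := PySem.Int.mod_lt _ (by omega)
      interval_cases h2 : (PySem.Int.mod num 2) <;> simp [PySem.Int.toStr] <;> rfl

theorem lsbChars_reverse (i : Int) : (LsbChars i).reverse = AltBits i := by
  induction i using AltBits.induct with
  | case1 i h => rw [LsbChars, AltBits]; simp [h]
  | case2 i h ih => rw [LsbChars, AltBits]; simp only [h, if_false]; rw [List.reverse_cons, ih]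

theorem getBinary_toList (num : Int) : (GetBinary num).toList = AltBits num := by
  unfold GetBinary
  rw [getBinaryLoop_eq]
  simp only [List.nil_append]
  rw [PySem.Str.toList_join]
  have : ((LsbChars num).map (fun c => String.ofList [c])).reverse.map String.toList
       = (AltBits num).map (fun c => [c]) := by
    rw [← lsbChars_reverse, ← List.map_reverse, List.map_map]
    simp [Function.comp_def]
  rw [this]
  simp [PySem.Chars.join_nil_singletons]

theorem buildLst_eq (i n : Int) (lst : List Int) :
    BuildLst i n lst = lst ++ PySem.List.pyRange i (n + 1) 1 := by
  induction i, lst using BuildLst.induct (n := n) with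
  | case1 i lst h =>
      rw [BuildLst]
      simp [h, PySem.List.pyRange_one_eq_nil (by omega : (n : Int) + 1 ≤ i)]
  | case2 i lst h ih =>
      rw [BuildLst]
      simp only [h, if_false]
      rw [ih, PySem.List.pyRange_one_cons (by omega : i < n + 1)]
      simp

theorem checkLoop_iff (s : String) (l : List String) :
    CheckLoop s l = true ↔ ∀ b ∈ l, b.toList <:+: s.toList := by
  induction l with
  | nil => simp [CheckLoop]
  | cons b rest ih =>
      rw [CheckLoop]
      by_cases h : PySem.Str.find s b = -1
      · simp only [h, if_true]
        rw [PySem.Str.find_eq_neg_one_iff] at h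
        simp [h]
      · simp only [h, if_false]
        have hin : b.toList <:+: s.toList := by
          rw [← PySem.Str.find_ne_neg_one_iff]; exact h
        simp [ih, hin]

-- bin(2k) = bin(k) ++ "0"
theorem altBits_double (k : Int) (hk : 1 ≤ k) :
    AltBits (2 * k) = AltBits k ++ ['0'] := by
  rw [AltBits]
  have h2 : ¬ (2 * k ≤ 0) := by omega
  simp only [h2, if_false]
  have hd : PySem.Int.floordiv (2 * k) 2 = k := by
    rw [PySem.Int.floordiv_eq_ediv_of_pos (by omega)]; omega
  have hm : PySem.Int.mod (2 * k) 2 = 0 := by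
    rw [PySem.Int.mod_eq_emod_of_pos (by omega)]; omega
  rw [hd, hm]; norm_num

-- the halving argument: substrings on the top half give substrings everywhere
theorem top_half_suffices (cs : List Char) (n : Int)
    (h : ∀ i, PySem.Int.floordiv n 2 + 1 ≤ i → i ≤ n → AltBits i <:+: cs) :
    ∀ k, 1 ≤ k → k ≤ n → AltBits k <:+: cs := by
  intro k hk1 hkn
  by_cases htop : PySem.Int.floordiv n 2 + 1 ≤ k
  · exact h k htop hkn
  · have hhalf : 2 * k ≤ n := by
      have := PySem.Int.floordiv_eq_ediv_of_pos (a := n) (b := 2) (by omega)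
      omega
    have ih : AltBits (2 * k) <:+: cs :=
      top_half_suffices cs n h (2 * k) (by omega) hhalf
    rw [altBits_double k hk1] at ih
    exact (List.prefix_append (AltBits k) ['0']).isInfix.trans ih
termination_by k => (n - k).toNat
decreasing_by
  have := PySem.Int.floordiv_eq_ediv_of_pos (a := n) (b := 2) (by omega)
  omega

theorem isIn_mk_altBits (s : String) (i : Int) :
    PySem.Str.isIn (String.ofList (AltBits i)) s = true ↔ AltBits i <:+: s.toList := by
  rw [PySem.Str.isIn_iff_infix, String.toList_ofList]

theorem alt_iff (s : String) (n : Int) :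
    LeetCode1016_alt s n = true ↔
      ∀ i, PySem.Int.floordiv n 2 + 1 ≤ i → i ≤ n → AltBits i <:+: s.toList := by
  unfold LeetCode1016_alt
  rw [List.all_eq_true]
  constructor
  · intro h i h1 h2
    have := h i (by rw [PySem.List.mem_pyRange_one]; omega)
    rwa [isIn_mk_altBits] at this
  · intro h i hi
    rw [PySem.List.mem_pyRange_one] at hi
    rw [isIn_mk_altBits]
    exact h i hi.1 (by omega)

theorem a_iff (s : String) (n : Int) :
    LeetCode1016 s n = true ↔ ∀ i, 1 ≤ i → i ≤ n → AltBits i <:+: s.toList := by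
  unfold LeetCode1016
  rw [buildLst_eq, List.nil_append, PySem.List.foldl_append_singleton_eq_map,
    checkLoop_iff]
  constructor
  · intro h i h1 h2
    have := h (GetBinary i) (List.mem_map_of_mem (by rw [PySem.List.mem_pyRange_one]; omega))
    rwa [getBinary_toList] at this
  · intro h b hb
    rcases List.mem_map.mp hb with ⟨i, hi, rfl⟩
    rw [PySem.List.mem_pyRange_one] at hi
    rw [getBinary_toList]
    exact h i hi.1 (by omega)

-- ===== VERDICT (by name: the statement is the Claim_ definition above) =====
theorem LeetCode1016_spec : Claim_equal_LeetCode1016 := by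
  intro s n _
  unfold Spec_LeetCode1016
  rw [Bool.eq_iff_iff, a_iff, alt_iff]
  constructor
  · intro h i h1 h2
    have hge : 1 ≤ i := by
      have := PySem.Int.floordiv_eq_ediv_of_pos (a := n) (b := 2) (by omega)
      have : 0 ≤ n / 2 := by
        by_cases hn : 0 ≤ n
        · positivity
        · omega
      omega
    exact h i hge h2
  · intro h k hk1 hkn
    exact top_half_suffices s.toList n h k hk1 hkn
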